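-- pv_equiv track=rewrite | github.com/hs929kr/Algorithm_Study | algorithm4_bitwise_operation/02_notation_conversion.py | N_notation_to_deciaml
-- ===== SOURCE A (Python) =====
-- def N_notation_to_deciaml(num,N):
--     if(N>10):
--         answer=0
--         std=ord('A')
--         num=list(num)
--         length=len(num)
--         for val in num:
--             length-=1
--             try:
--                 answer+=(N**length)*int(val)
--             except:
--                 answer+=(N**length)*(ord(val)-std+10)
--         return answer
--     elif(N<10):
--         answer=0
--         num=list(num)
--         length=len(num)
--         for val in num:
--             length-=1
--             answer+=(N**length)*int(val)
--         return answer
--     else: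
--         answer=int(num)
--         return answer
-- ===== SOURCE B (Python) =====
-- def N_notation_to_deciaml(num, N):
--     if N == 10:
--         return int(num)
--     answer = 0
--     for c in num:
--         d = ord(c) - 48 if '0' <= c <= '9' else ord(c) - 55
--         answer = answer * N + d
--     return answer
-- ===== Notes on version B (the rewrite author's own statement) =====
-- stated objective: faster
-- what changed: Replaces the per-digit N**length power computation (and the try/except digit decoding) with a single left-to-right Horner pass answer = answer*N + digit, and folds A's two near-identical loops into one.
import Mathlib
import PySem

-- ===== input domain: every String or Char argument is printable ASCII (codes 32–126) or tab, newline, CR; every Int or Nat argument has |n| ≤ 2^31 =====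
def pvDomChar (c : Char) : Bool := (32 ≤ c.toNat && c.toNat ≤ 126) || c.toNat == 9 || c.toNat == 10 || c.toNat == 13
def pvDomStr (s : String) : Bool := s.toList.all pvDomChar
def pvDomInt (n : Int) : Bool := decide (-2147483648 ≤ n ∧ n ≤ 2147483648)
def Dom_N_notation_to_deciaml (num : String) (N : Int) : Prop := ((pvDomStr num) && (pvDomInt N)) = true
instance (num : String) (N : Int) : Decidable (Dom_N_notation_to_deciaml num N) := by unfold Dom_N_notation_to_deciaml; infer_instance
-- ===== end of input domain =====

-- B replaces A's per-character N**length power evaluations by a single Horner pass (answer = answer*N + digit).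
-- Equivalence is about the RETURN value; A rebinds only its local variables.

-- ===== PORT A =====
-- A, N>10 branch: answer += N**length * int(val), except: answer += N**length * (ord(val)-ord('A')+10)
def pvAfoldHi (N : Int) : Int × Nat → List Char → Int
  | (answer, _), [] => answer
  | (answer, length), c :: cs =>
      let length' := length - 1
      let answer' :=
        match PySem.Int.ofChars? [c] with        -- try: int(val)
        | some v => answer + N ^ length' * v
        | none   => answer + N ^ length' * ((c.toNat : Int) - 65 + 10)  -- except: ord(val)-std+10
      pvAfoldHi N (answer', length') cs

-- A, N<10 branch: answer += N**length * int(val)  (int(val) raises on a non-digit; excluded by Pre_)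
def pvAfoldLo (N : Int) : Int × Nat → List Char → Int
  | (answer, _), [] => answer
  | (answer, length), c :: cs =>
      let length' := length - 1
      pvAfoldLo N (answer + N ^ length' * (PySem.Int.ofChars? [c]).getD 0, length') cs

def N_notation_to_deciaml (num : String) (N : Int) : Int :=
  if N > 10 then pvAfoldHi N (0, num.toList.length) num.toList
  else if N < 10 then pvAfoldLo N (0, num.toList.length) num.toList
  else (PySem.Int.ofStr? num).getD 0            -- int(num); raises outside Pre_

-- ===== PORT B =====
-- Horner loop: answer = answer*N + d, with d = ord(c)-48 if '0'<=c<='9' else ord(c)-55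
def pvHorner (N : Int) (answer : Int) : List Char → Int
  | [] => answer
  | c :: cs =>
      pvHorner N (answer * N + (if 48 ≤ c.toNat ∧ c.toNat ≤ 57 then (c.toNat : Int) - 48 else (c.toNat : Int) - 55)) cs

def N_notation_to_deciaml_alt (num : String) (N : Int) : Int :=
  if N = 10 then (PySem.Int.ofStr? num).getD 0  -- int(num)
  else pvHorner N 0 num.toList

-- ===== PRECONDITION & SPEC =====
-- Pre_ excludes exactly the inputs where A raises ValueError: N = 10 with a string int() rejects,
-- and N < 10 with a character that is not an ASCII digit.
def Pre_N_notation_to_deciaml (num : String) (N : Int) : Prop :=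
  (N = 10 → (PySem.Int.ofStr? num).isSome) ∧
  (N < 10 → ∀ c ∈ num.toList, 48 ≤ c.toNat ∧ c.toNat ≤ 57)
instance (num : String) (N : Int) : Decidable (Pre_N_notation_to_deciaml num N) := by
  unfold Pre_N_notation_to_deciaml; infer_instance

def pvWitness_N_notation_to_deciaml : String × Int := ("FF", 16)

def Spec_N_notation_to_deciaml (num : String) (N : Int) (out : Int) : Prop := out = N_notation_to_deciaml_alt num N
instance (num : String) (N : Int) (out : Int) : Decidable (Spec_N_notation_to_deciaml num N out) := by unfold Spec_N_notation_to_deciaml; infer_instance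

-- ===== CLAIM (what is proved, stated in full; the proofs are below) =====
def Claim_equal_N_notation_to_deciaml : Prop := ∀ (num : String) (N : Int), Dom_N_notation_to_deciaml num N → Pre_N_notation_to_deciaml num N → Spec_N_notation_to_deciaml num N (N_notation_to_deciaml num N)

-- ===== LEMMAS AND PROOFS =====

-- place value of a digit string: sum of d(c) * N^position (proof-only helper)
def pvVal (N : Int) : List Char → Int
  | [] => 0
  | c :: cs =>
      (if 48 ≤ c.toNat ∧ c.toNat ≤ 57 then (c.toNat : Int) - 48 else (c.toNat : Int) - 55) * N ^ cs.length
        + pvVal N cs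

-- int(c) for a single character with code < 127: some (code-48) on an ASCII digit, ValueError otherwise
theorem pvOfCharsSingle (n : Nat) (h : n < 127) :
    PySem.Int.ofChars? [Char.ofNat n] =
      if 48 ≤ n ∧ n ≤ 57 then some ((n : Int) - 48) else none := by
  revert h
  exact (by decide : ∀ m < 127, PySem.Int.ofChars? [Char.ofNat m] =
      if 48 ≤ m ∧ m ≤ 57 then some ((m : Int) - 48) else none) n

theorem pvOfCharsSingle' (c : Char) (h : c.toNat < 127) :
    PySem.Int.ofChars? [c] =
      if 48 ≤ c.toNat ∧ c.toNat ≤ 57 then some ((c.toNat : Int) - 48) else none := by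
  have := pvOfCharsSingle c.toNat h
  rwa [Char.ofNat_toNat] at this

theorem pvHorner_eq_val (N : Int) (l : List Char) : ∀ a : Int,
    pvHorner N a l = a * N ^ l.length + pvVal N l := by
  induction l with
  | nil => intro a; simp [pvHorner, pvVal]
  | cons c cs ih =>
      intro a
      simp only [pvHorner, pvVal, List.length_cons]
      rw [ih]
      ring

theorem pvHi_eq (N : Int) (l : List Char) (hd : ∀ c ∈ l, c.toNat < 127) : ∀ a : Int,
    pvAfoldHi N (a, l.length) l = a + pvVal N l := by
  induction l with
  | nil => intro a; simp [pvAfoldHi, pvVal]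
  | cons c cs ih =>
      intro a
      have hc : c.toNat < 127 := hd c (List.mem_cons_self ..)
      have hcs : ∀ x ∈ cs, x.toNat < 127 := fun x hx => hd x (List.mem_cons_of_mem _ hx)
      by_cases h : 48 ≤ c.toNat ∧ c.toNat ≤ 57
      · simp only [pvAfoldHi, pvVal, List.length_cons, Nat.add_sub_cancel,
          pvOfCharsSingle' c hc, if_pos h]
        rw [ih hcs]
        ring
      · simp only [pvAfoldHi, pvVal, List.length_cons, Nat.add_sub_cancel,
          pvOfCharsSingle' c hc, if_neg h]
        rw [ih hcs]
        ring

theorem pvLo_eq (N : Int) (l : List Char) (hd : ∀ c ∈ l, 48 ≤ c.toNat ∧ c.toNat ≤ 57) : ∀ a : Int,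
    pvAfoldLo N (a, l.length) l = a + pvVal N l := by
  induction l with
  | nil => intro a; simp [pvAfoldLo, pvVal]
  | cons c cs ih =>
      intro a
      have hc := hd c (List.mem_cons_self ..)
      have hcs : ∀ x ∈ cs, 48 ≤ x.toNat ∧ x.toNat ≤ 57 := fun x hx => hd x (List.mem_cons_of_mem _ hx)
      have hc' : c.toNat < 127 := by omega
      simp only [pvAfoldLo, pvVal, List.length_cons, Nat.add_sub_cancel,
        pvOfCharsSingle' c hc', if_pos hc, Option.getD_some]
      rw [ih hcs]
      ring

-- ===== VERDICT (by name: the statement is the Claim_ definition above) =====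
theorem N_notation_to_deciaml_spec : Claim_equal_N_notation_to_deciaml := by
  intro num N hdom hpre
  unfold Spec_N_notation_to_deciaml N_notation_to_deciaml N_notation_to_deciaml_alt
  have hchars : ∀ c ∈ num.toList, c.toNat < 127 := by
    intro c hc
    have h1 : pvDomStr num = true := by
      unfold Dom_N_notation_to_deciaml at hdom
      exact ((Bool.and_eq_true ..).mp hdom).1
    have h2 : pvDomChar c = true := List.all_eq_true.mp h1 c hc
    unfold pvDomChar at h2
    simp only [Bool.or_eq_true, Bool.and_eq_true, decide_eq_true_eq, beq_iff_eq] at h2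
    omega
  rcases lt_trichotomy N 10 with h | h | h
  · rw [if_neg (by omega), if_pos h, if_neg (by omega),
      pvLo_eq N _ (hpre.2 h) 0, pvHorner_eq_val]
    ring
  · rw [if_neg (by omega), if_neg (by omega), if_pos h]
  · rw [if_pos h, if_neg (by omega),
      pvHi_eq N _ hchars 0, pvHorner_eq_val]
    ring
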